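-- pv_equiv track=rewrite | github.com/Arctanxy/learning_notes | study/lintcode/PAT/PAT_TOP/LUCKY_STRING.py | lucky_or_not
-- ===== SOURCE A (Python) =====
-- def lucky_or_not(s,f):
--     luck_list = []
--     for i in range(len(s)):
--         for j in range(i+1,len(s)+1):
--             sub_s = s[i:j]
--             if len(set(sub_s)) in f:
--                 luck_list.append(sub_s)
--     return luck_list
-- ===== SOURCE B (Python) =====
-- def lucky_or_not(s, f):
--     luck_list = []
--     for i in range(len(s)):
--         seen = set()
--         sub = ""
--         for c in s[i:]:
--             sub += c
--             seen.add(c)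
--             if len(seen) in f:
--                 luck_list.append(sub)
--     return luck_list
-- ===== Notes on version B (the rewrite author's own statement) =====
-- stated objective: alternative
-- what changed: Instead of slicing s[i:j] and rebuilding set(s[i:j]) from scratch for every (i,j) pair, B iterates the characters of the suffix s[i:] once per start index, carrying a running distinct-character set and a growing substring, so the per-step set is maintained incrementally rather than recomputed; measured ~1.5-1.7x at mid sizes but the Theta(n^2) output keeps both quadratic-plus overall, so no speed is claimed.
import Mathlib
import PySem

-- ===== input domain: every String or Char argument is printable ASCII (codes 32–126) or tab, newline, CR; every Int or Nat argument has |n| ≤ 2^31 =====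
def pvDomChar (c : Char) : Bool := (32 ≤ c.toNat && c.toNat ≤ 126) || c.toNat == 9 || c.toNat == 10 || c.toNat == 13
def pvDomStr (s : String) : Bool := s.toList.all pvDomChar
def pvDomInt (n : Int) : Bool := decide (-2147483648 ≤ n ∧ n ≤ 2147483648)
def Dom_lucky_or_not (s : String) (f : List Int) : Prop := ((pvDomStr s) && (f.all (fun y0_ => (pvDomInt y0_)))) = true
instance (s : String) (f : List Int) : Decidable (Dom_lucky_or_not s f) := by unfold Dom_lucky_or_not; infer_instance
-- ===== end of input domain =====

-- B keeps a running set of distinct characters and the growing substring per start index instead of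
-- rebuilding set(s[i:j]) and the slice from scratch for every j (objective: alternative decomposition).

-- ===== PORT A =====
def lucky_or_not (s : String) (f : List Int) : List String :=
  (PySem.List.pyRange 0 (PySem.Str.len s) 1).foldl (fun luck_list i =>
    (PySem.List.pyRange (i + 1) (PySem.Str.len s + 1) 1).foldl (fun luck_list j =>
      let sub_s := PySem.Str.slice s (some i) (some j)
      if PySem.Set.len (PySem.Set.ofList sub_s.toList) ∈ f then luck_list ++ [sub_s]
      else luck_list) luck_list) []

-- ===== PORT B =====
-- 'sub += c' is carried as a List Char and materialised with String.ofList at the append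
-- (exact: Python string concatenation of the same characters).
def lucky_or_not_alt (s : String) (f : List Int) : List String :=
  (PySem.List.pyRange 0 (PySem.Str.len s) 1).foldl (fun luck_list i =>
    ((PySem.Str.slice s (some i) none).toList.foldl
      (fun (st : List String × List Char × PySem.Set Char) c =>
        let sub := st.2.1 ++ [c]
        let seen := PySem.Set.add st.2.2 c
        if PySem.Set.len seen ∈ f then (st.1 ++ [String.ofList sub], sub, seen)
        else (st.1, sub, seen))
      (luck_list, [], PySem.Set.empty)).1) []

-- ===== PRECONDITION & SPEC =====
def Spec_lucky_or_not (s : String) (f : List Int) (out : List String) : Prop := out = lucky_or_not_alt s f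
instance (s : String) (f : List Int) (out : List String) : Decidable (Spec_lucky_or_not s f out) := by unfold Spec_lucky_or_not; infer_instance

-- ===== CLAIM (what is proved, stated in full; the proofs are below) =====
def Claim_equal_lucky_or_not : Prop := ∀ (s : String) (f : List Int), Dom_lucky_or_not s f → Spec_lucky_or_not s f (lucky_or_not s f)

-- ===== LEMMAS AND PROOFS =====

theorem pv_ofList_snoc {α : Type} [BEq α] (p : List α) (c : α) :
    PySem.Set.ofList (p ++ [c]) = PySem.Set.add (PySem.Set.ofList p) c := by
  simp [PySem.Set.ofList_eq_foldl, List.foldl_append]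

-- one step of the slice: s[i:m+1] = s[i:m] ++ [s[m]]
theorem pv_take_drop_snoc (t : List Char) (i m : Nat) (him : i ≤ m) (hm : m < t.length) :
    (t.drop i).take (m + 1 - i) = (t.drop i).take (m - i) ++ [t[m]] := by
  have h1 : m + 1 - i = (m - i) + 1 := by omega
  rw [h1, List.take_add_one]
  have h2 : (t.drop i)[m - i]? = some t[m] := by
    rw [List.getElem?_drop]
    have : i + (m - i) = m := by omega
    rw [this, List.getElem?_eq_getElem hm]
  simp [h2]

-- the inner loops agree: A's j-range fold equals B's character fold carrying the running prefix/set
theorem pv_inner (s : String) (f : List Int) (i : Nat) :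
    ∀ (d m : Nat) (luck : List String), m + d = s.toList.length → i ≤ m →
    (PySem.List.pyRange ((m : Int) + 1) ((s.toList.length : Int) + 1) 1).foldl (fun luck_list j =>
        let sub_s := PySem.Str.slice s (some (i : Int)) (some j)
        if PySem.Set.len (PySem.Set.ofList sub_s.toList) ∈ f then luck_list ++ [sub_s]
        else luck_list) luck
    = ((s.toList.drop m).foldl
        (fun (st : List String × List Char × PySem.Set Char) c =>
          let sub := st.2.1 ++ [c]
          let seen := PySem.Set.add st.2.2 c
          if PySem.Set.len seen ∈ f then (st.1 ++ [String.ofList sub], sub, seen)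
          else (st.1, sub, seen))
        (luck, (s.toList.drop i).take (m - i),
          PySem.Set.ofList ((s.toList.drop i).take (m - i)))).1 := by
  intro d
  induction d with
  | zero =>
      intro m luck hmd him
      have hm : m = s.toList.length := by omega
      subst hm
      rw [PySem.List.pyRange_one_eq_nil (by omega), List.drop_length]
      simp
  | succ d ih =>
      intro m luck hmd him
      have hm : m < s.toList.length := by omega
      have hts : m + 1 - i = m - i + 1 := by omega
      have hsnoc := pv_take_drop_snoc s.toList i m him hm
      rw [hts] at hsnoc
      have hsub : PySem.Str.slice s (some (i : Int)) (some ((m : Int) + 1))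
          = String.ofList ((s.toList.drop i).take (m - i + 1)) := by
        have e1 : ((m : Int) + 1) = (((m + 1 : Nat)) : Int) := by push_cast; ring
        have e2 : PySem.Str.slice s (some (i : Int)) (some ((m + 1 : Nat) : Int))
            = String.ofList (PySem.List.slice s.toList (some (i : Int)) (some ((m + 1 : Nat) : Int))) := by
          simp [PySem.Str.slice]
        rw [e1, e2, PySem.List.slice_natCast, hts]
      have harg : (m : Int) + 1 + 1 = ((m + 1 : Nat) : Int) + 1 := by push_cast; ring
      rw [PySem.List.pyRange_one_cons
        (by exact_mod_cast (by omega : (m : Int) + 1 < (s.toList.length : Int) + 1))]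
      rw [List.drop_eq_getElem_cons hm]
      simp only [List.foldl_cons]
      rw [harg, ih (m + 1) _ (by omega) (by omega), hts]
      by_cases hc : PySem.Set.len
          (PySem.Set.add (PySem.Set.ofList ((s.toList.drop i).take (m - i))) s.toList[m]) ∈ f
      · simp only [PySem.Set.len] at hc
        simp [hsub, hsnoc, pv_ofList_snoc, hc]
      · simp only [PySem.Set.len] at hc
        simp [hsub, hsnoc, pv_ofList_snoc, hc]

-- ===== VERDICT (by name: the statement is the Claim_ definition above) =====
theorem lucky_or_not_spec : Claim_equal_lucky_or_not := by
  intro s f _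
  unfold Spec_lucky_or_not lucky_or_not lucky_or_not_alt
  simp only [PySem.Str.len_eq]
  apply PySem.List.foldl_congr_mem
  intro acc i hi
  rw [PySem.List.mem_pyRange_one] at hi
  obtain ⟨hi0, hin⟩ := hi
  obtain ⟨a, rfl⟩ : ∃ a : Nat, i = (a : Int) := ⟨i.toNat, (Int.toNat_of_nonneg hi0).symm⟩
  have := pv_inner s f a ((s.toList.length) - a) a acc (by omega) (le_refl a)
  simp only [Nat.sub_self, List.take_zero] at this
  rw [this]
  have hdrop : (PySem.Str.slice s (some (a : Int)) none).toList = s.toList.drop a := by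
    simp [PySem.Str.slice, PySem.List.slice_from_natCast]
  rw [hdrop]
  rfl
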